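-- pv_equiv track=rewrite | github.com/epilectrik/voynich | phases/YALE_ALIGNMENT/dy_ending_analysis.py | analyze_dy_endings
-- ===== SOURCE A (Python) =====
-- from collections import Counter, defaultdict
--
-- def analyze_dy_endings(words):
--     """Analyze distribution of 'dy' endings across languages."""
--
--     # Count endings
--     ending_by_lang = defaultdict(Counter)
--     dy_words_by_lang = defaultdict(list)
--
--     for entry in words:
--         word = entry['word']
--         lang = entry['language']
--
--         # Get last 2 characters as ending
--         if len(word) >= 2:
--             ending = word[-2:]
--             ending_by_lang[lang][ending] += 1
--
--             if ending == 'dy':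
--                 dy_words_by_lang[lang].append(word)
--
--     return ending_by_lang, dy_words_by_lang
-- ===== SOURCE B (Python) =====
-- from collections import Counter, defaultdict
--
-- def analyze_dy_endings(words):
--     """Analyze distribution of 'dy' endings across languages."""
--     # Phase 1: keep only the words long enough to have a 2-char ending, tagged with their language
--     tagged = [(e['language'], e['word']) for e in words if len(e['word']) >= 2]
--     # Phase 2: group those words by language (key order = first qualifying word per language)
--     groups = defaultdict(list)
--     for lang, word in tagged:
--         groups[lang].append(word)
--     # Phase 3: one Counter per language over the endings of its group
--     ending_by_lang = defaultdict(Counter)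
--     for lang, group in groups.items():
--         ending_by_lang[lang] = Counter(w[-2:] for w in group)
--     # Phase 4: 'dy' words grouped by language (key order = first 'dy' word per language)
--     dy_words_by_lang = defaultdict(list)
--     for lang, word in tagged:
--         if word[-2:] == 'dy':
--             dy_words_by_lang[lang].append(word)
--     return ending_by_lang, dy_words_by_lang
-- ===== Notes on version B (the rewrite author's own statement) =====
-- stated objective: alternative
-- what changed: A builds both defaultdicts incrementally in one interleaved loop over the entries; B first filters the entries into (language, word) pairs with len(word)>=2, groups the words by language into a table, then builds each language's Counter in one per-group pass and collects the 'dy' words in a separate filtered pass.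
import Mathlib
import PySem

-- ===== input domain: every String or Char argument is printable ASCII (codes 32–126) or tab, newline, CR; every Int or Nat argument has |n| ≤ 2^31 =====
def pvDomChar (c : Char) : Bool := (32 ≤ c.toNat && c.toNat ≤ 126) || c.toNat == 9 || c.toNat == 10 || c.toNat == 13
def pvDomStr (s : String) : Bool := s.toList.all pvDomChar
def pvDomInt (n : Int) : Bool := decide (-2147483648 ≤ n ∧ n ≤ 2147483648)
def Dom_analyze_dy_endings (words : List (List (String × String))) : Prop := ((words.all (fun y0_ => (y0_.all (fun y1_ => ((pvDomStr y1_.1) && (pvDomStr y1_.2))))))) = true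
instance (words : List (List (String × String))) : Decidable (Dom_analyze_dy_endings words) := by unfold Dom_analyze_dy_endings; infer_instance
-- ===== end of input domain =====

-- B replaces A's single interleaved loop by a filter-then-group-then-count decomposition
-- (group words by language first, then build one Counter per language); objective: alternative
-- decomposition, same cost. Return-value equivalence only; neither version mutates its argument.

-- w[-2:] (Python string slice; exact via PySem.List.slice on the character list)
def pvLast2 (w : String) : String := String.ofList (PySem.List.slice w.toList (some (-2)) none)

-- ===== PORT A =====
-- loop body of A (entry['word'] / entry['language'] are total under Pre_; .getD "" stands for the KeyError case)
def pvStepA (st : PySem.Dict String (PySem.Dict String Int) × PySem.Dict String (List String))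
    (entry : List (String × String)) :
    PySem.Dict String (PySem.Dict String Int) × PySem.Dict String (List String) :=
  let word := ((PySem.Dict.mk entry).get? "word").getD ""
  let lang := ((PySem.Dict.mk entry).get? "language").getD ""
  if 2 ≤ PySem.Str.len word then
    let ending := pvLast2 word
    let e := st.1.modify lang PySem.Dict.empty (fun c => c.modify ending 0 (· + 1))
    let d := if ending == "dy" then st.2.modify lang [] (fun l => l ++ [word]) else st.2
    (e, d)
  else st

def analyze_dy_endings (words : List (List (String × String))) : (List (String × List (String × Int))) × (List (String × List String)) :=
  let r := words.foldl pvStepA (PySem.Dict.empty, PySem.Dict.empty)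
  (r.1.items.map (fun p => (p.1, p.2.items)), r.2.items)

-- ===== PORT B =====
def analyze_dy_endings_alt (words : List (List (String × String))) : (List (String × List (String × Int))) × (List (String × List String)) :=
  -- Phase 1: the (language, word) pairs with len(word) >= 2
  let tagged : List (String × String) := words.filterMap (fun entry =>
    let word := ((PySem.Dict.mk entry).get? "word").getD ""
    if 2 ≤ PySem.Str.len word then some (((PySem.Dict.mk entry).get? "language").getD "", word) else none)
  -- Phase 2: group the words by language
  let groups : PySem.Dict String (List String) :=
    tagged.foldl (fun g p => g.modify p.1 [] (fun l => l ++ [p.2])) PySem.Dict.empty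
  -- Phase 3: one Counter per language over the endings of its group
  let ending_by_lang : PySem.Dict String (PySem.Dict String Int) :=
    groups.items.foldl (fun e p => e.insert p.1 (PySem.Dict.counter (p.2.map pvLast2))) PySem.Dict.empty
  -- Phase 4: 'dy' words grouped by language
  let dy_words_by_lang : PySem.Dict String (List String) :=
    tagged.foldl (fun d p => if pvLast2 p.2 == "dy" then d.modify p.1 [] (fun l => l ++ [p.2]) else d) PySem.Dict.empty
  (ending_by_lang.items.map (fun p => (p.1, p.2.items)), dy_words_by_lang.items)

-- ===== PRECONDITION & SPEC =====
-- Pre_ excludes entries missing the 'word' or 'language' key (Python A raises KeyError there) and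
-- entries whose key list has duplicates (no Python dict is represented by such an association list).
def Pre_analyze_dy_endings (words : List (List (String × String))) : Prop :=
  ∀ entry ∈ words, (entry.map Prod.fst).Nodup ∧
    (PySem.Dict.mk entry).contains "word" = true ∧ (PySem.Dict.mk entry).contains "language" = true
instance (words : List (List (String × String))) : Decidable (Pre_analyze_dy_endings words) := by
  unfold Pre_analyze_dy_endings; infer_instance

def pvWitness_analyze_dy_endings : (List (List (String × String))) :=
  [[("word", "chedy"), ("language", "voynich")], [("word", "ab"), ("language", "latin")]]

def Spec_analyze_dy_endings (words : List (List (String × String))) (out : (List (String × List (String × Int))) × (List (String × List String))) : Prop := out = analyze_dy_endings_alt words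
instance (words : List (List (String × String))) (out : (List (String × List (String × Int))) × (List (String × List String))) : Decidable (Spec_analyze_dy_endings words out) := by unfold Spec_analyze_dy_endings; infer_instance

-- ===== CLAIM (what is proved, stated in full; the proofs are below) =====
def Claim_equal_analyze_dy_endings : Prop := ∀ (words : List (List (String × String))), Dom_analyze_dy_endings words → Pre_analyze_dy_endings words → Spec_analyze_dy_endings words (analyze_dy_endings words)

-- ===== LEMMAS AND PROOFS =====

-- abbreviations for the three loop bodies appearing in the proof
def pvEStep (e : PySem.Dict String (PySem.Dict String Int)) (p : String × String) : PySem.Dict String (PySem.Dict String Int) :=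
  e.modify p.1 PySem.Dict.empty (fun c => c.modify (pvLast2 p.2) 0 (· + 1))
def pvDStep (d : PySem.Dict String (List String)) (p : String × String) : PySem.Dict String (List String) :=
  if pvLast2 p.2 == "dy" then d.modify p.1 [] (fun l => l ++ [p.2]) else d
def pvGStep (g : PySem.Dict String (List String)) (p : String × String) : PySem.Dict String (List String) :=
  g.modify p.1 [] (fun l => l ++ [p.2])
def pvTagged (words : List (List (String × String))) : List (String × String) :=
  words.filterMap (fun entry =>
    let word := ((PySem.Dict.mk entry).get? "word").getD ""
    if 2 ≤ PySem.Str.len word then some (((PySem.Dict.mk entry).get? "language").getD "", word) else none)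

-- A's loop over the entries is the paired (E, D) loop over the tagged pairs
theorem pv_foldA_eq (words : List (List (String × String))) :
    ∀ st, words.foldl pvStepA st = ((pvTagged words).foldl pvEStep st.1, (pvTagged words).foldl pvDStep st.2) := by
  induction words with
  | nil => intro st; simp [pvTagged]
  | cons entry ws ih =>
    intro st
    rw [List.foldl_cons, ih (pvStepA st entry)]
    by_cases h : 2 ≤ (((PySem.Dict.mk entry).get? "word").getD "").length
    · simp [pvTagged, pvStepA, pvEStep, pvDStep, h]
    · simp [pvTagged, pvStepA, h]

-- value of A's nested-counter loop at one language key
theorem pv_getD_E (T : List (String × String)) (lang : String) :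
    ∀ e, (T.foldl pvEStep e).getD lang PySem.Dict.empty
      = ((T.filter (fun p => p.1 == lang)).map (fun p => pvLast2 p.2)).foldl
          (fun c x => c.modify x 0 (· + 1)) (e.getD lang PySem.Dict.empty) := by
  induction T with
  | nil => intro e; simp
  | cons p T ih =>
    intro e
    by_cases h : p.1 = lang
    · simp only [List.foldl_cons, List.filter_cons, h, BEq.rfl, if_true, List.map_cons]
      rw [ih]
      simp [pvEStep, h]
    · have h' : (p.1 == lang) = false := by simp [h]
      have h2 : ¬ lang = p.1 := fun hh => h hh.symm
      simp only [List.foldl_cons, List.filter_cons, h', Bool.false_eq_true, if_false]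
      rw [ih]
      simp [pvEStep, PySem.Dict.getD_modify, h2]

theorem pv_keys_E (T : List (String × String)) :
    (T.foldl pvEStep PySem.Dict.empty).keys = PySem.Set.ofList (T.map Prod.fst) := by
  have h1 := PySem.Dict.keys_foldl_modify_key (l := T) (key := Prod.fst)
    (d0 := PySem.Dict.empty) (f := fun _ p => (fun (c : PySem.Dict String Int) => c.modify (pvLast2 p.2) 0 (· + 1)))
    (d := PySem.Dict.empty)
  have h2 : T.foldl pvEStep PySem.Dict.empty
      = T.foldl (fun d (x : String × String) => d.modify x.1 PySem.Dict.empty fun c => c.modify (pvLast2 x.2) 0 (· + 1)) PySem.Dict.empty := rfl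
  rw [h2]
  refine h1.trans ?_
  simp [PySem.Set.update_nil_left]

theorem pv_keys_G (T : List (String × String)) :
    (T.foldl pvGStep PySem.Dict.empty).keys = PySem.Set.ofList (T.map Prod.fst) := by
  have := PySem.Dict.keys_foldl_modify_key (l := T) (key := Prod.fst)
    (d0 := ([] : List String)) (f := fun _ p => (fun l => l ++ [p.2]))
    (d := PySem.Dict.empty)
  simpa [pvGStep, PySem.Set.update_nil_left] using this

theorem pv_nodup_keys_E (T : List (String × String)) :
    (T.foldl pvEStep PySem.Dict.empty).keys.Nodup := by
  rw [pv_keys_E]; exact PySem.Set.nodup_ofList _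

theorem pv_nodup_keys_G (T : List (String × String)) :
    (T.foldl pvGStep PySem.Dict.empty).keys.Nodup := by
  rw [pv_keys_G]; exact PySem.Set.nodup_ofList _

-- B's per-group insert loop over fresh distinct keys just maps the grouping's items
theorem pv_phi_items (G : PySem.Dict String (List String)) (hnd : G.keys.Nodup) :
    (G.items.foldl (fun e p => e.insert p.1 (PySem.Dict.counter (p.2.map pvLast2))) PySem.Dict.empty).items
      = G.items.map (fun p => (p.1, PySem.Dict.counter (p.2.map pvLast2))) := by
  have := PySem.Dict.items_foldl_insert_fresh (l := G.items) (k := Prod.fst)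
    (v := fun p => PySem.Dict.counter (p.2.map pvLast2)) (d := (PySem.Dict.empty : PySem.Dict String (PySem.Dict String Int)))
    (by intro a _; simp) (by simpa [PySem.Dict.keys] using hnd)
  simpa using this

-- the nested-counter dict A builds equals B's per-group counters, as dicts
theorem pv_E_eq_phi (T : List (String × String)) :
    T.foldl pvEStep PySem.Dict.empty
      = ((T.foldl pvGStep PySem.Dict.empty).items.foldl
          (fun e p => e.insert p.1 (PySem.Dict.counter (p.2.map pvLast2))) PySem.Dict.empty) := by
  apply PySem.Dict.ext
  rw [pv_phi_items _ (pv_nodup_keys_G T)]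
  rw [PySem.Dict.items_eq_map_keys _ (pv_nodup_keys_E T) PySem.Dict.empty]
  rw [PySem.Dict.items_eq_map_keys _ (pv_nodup_keys_G T) ([] : List String)]
  rw [List.map_map, pv_keys_E, pv_keys_G]
  apply List.map_congr_left
  intro lang _
  simp only [Function.comp_apply]
  congr 1
  rw [pv_getD_E]
  have hG : (T.foldl pvGStep PySem.Dict.empty).getD lang [] = (T.filter (fun p => p.1 == lang)).map Prod.snd := by
    have := PySem.Dict.getD_foldl_modify_append (l := T) (d := (PySem.Dict.empty : PySem.Dict String (List String))) (c := lang)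
    simpa [pvGStep] using this
  rw [hG, List.map_map, PySem.Dict.counter_eq_foldl]
  simp [Function.comp_def]

-- ===== VERDICT (by name: the statement is the Claim_ definition above) =====
theorem analyze_dy_endings_spec : Claim_equal_analyze_dy_endings := by
  intro words _ _
  unfold Spec_analyze_dy_endings analyze_dy_endings analyze_dy_endings_alt
  rw [pv_foldA_eq words (PySem.Dict.empty, PySem.Dict.empty)]
  simp only []
  rw [show (words.filterMap _ : List (String × String)) = pvTagged words from rfl]
  rw [pv_E_eq_phi (pvTagged words)]
  rfl
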